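-- pv_equiv track=rewrite | github.com/leifgehrmann/lego-art-map-generator | map_generator/step_5_sea_2.py | raster_odd_iterator
-- ===== SOURCE A (Python) =====
-- from typing import Dict, Tuple, Iterator, List
--
-- def raster_odd_iterator(
--         width: int,
--         height: int
-- ) -> Iterator[Tuple[int, int]]:
--     for i_h in range(height):
--         for i_w in range(int(width / 2)):
--             x = (i_w * 2 + i_h % 2)
--             y = i_h
--             if x < width:
--                 yield x, y
--     for i_h in range(height):
--         for i_w in range(int(width / 2)):
--             x = (i_w * 2 + (i_h + 1) % 2)
--             y = i_h
--             if x < width: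
--                 yield x, y
-- ===== SOURCE B (Python) =====
-- def raster_odd_iterator(width, height):
--     # Single flat loop: the k-th yielded cell is recovered by divmod index
--     # arithmetic (block, row, column) instead of three nested loops.
--     half = max(width // 2, 0)
--     rows = max(height, 0)
--     total = rows * half
--     for k in range(2 * total):
--         block, r = divmod(k, total)
--         y, i = divmod(r, half)
--         yield (2 * i + (y + block) % 2, y)
-- ===== Notes on version B (the rewrite author's own statement) =====
-- stated objective: alternative
-- what changed: Replaces A's two copies of nested row/column loops (with stride arithmetic and a dead x<width guard) by one flat loop over a single index k of size 2*rows*half, recovering block, row and column from k by divmod; the parity offset becomes (y+block)%2.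
import Mathlib
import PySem

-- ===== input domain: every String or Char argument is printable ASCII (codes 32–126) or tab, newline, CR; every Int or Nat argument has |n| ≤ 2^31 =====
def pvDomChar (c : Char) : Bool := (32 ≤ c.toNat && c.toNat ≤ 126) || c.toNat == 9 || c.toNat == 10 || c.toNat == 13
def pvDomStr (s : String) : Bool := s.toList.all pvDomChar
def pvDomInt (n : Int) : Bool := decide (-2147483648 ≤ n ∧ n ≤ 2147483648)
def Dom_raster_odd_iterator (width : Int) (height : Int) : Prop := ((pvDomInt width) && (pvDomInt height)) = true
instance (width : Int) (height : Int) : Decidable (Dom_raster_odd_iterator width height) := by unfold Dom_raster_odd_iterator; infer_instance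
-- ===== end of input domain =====

-- B replaces A's two copies of nested row/column loops by one flat loop over a
-- single index k, recovering block, row and column by divmod — same output.


-- ===== PORT A =====
-- int(width / 2) truncates toward zero: Int.tdiv (exact, |width| ≤ 2^31 < 2^53)
def raster_odd_iterator (width : Int) (height : Int) : List (Int × Int) :=
  let first := (PySem.List.pyRange 0 height 1).foldl (fun acc i_h =>
    (PySem.List.pyRange 0 (width.tdiv 2) 1).foldl (fun acc2 i_w =>
      let x := i_w * 2 + i_h % 2
      let y := i_h
      if x < width then acc2 ++ [(x, y)] else acc2) acc) []
  (PySem.List.pyRange 0 height 1).foldl (fun acc i_h =>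
    (PySem.List.pyRange 0 (width.tdiv 2) 1).foldl (fun acc2 i_w =>
      let x := i_w * 2 + (i_h + 1) % 2
      let y := i_h
      if x < width then acc2 ++ [(x, y)] else acc2) acc) first

-- ===== PORT B =====
def raster_odd_iterator_alt (width : Int) (height : Int) : List (Int × Int) :=
  let half := max (PySem.Int.floordiv width 2) 0
  let rows := max height 0
  let total := rows * half
  (PySem.List.pyRange 0 (2 * total) 1).map (fun k =>
    let block := PySem.Int.floordiv k total
    let r := PySem.Int.mod k total
    let y := PySem.Int.floordiv r half
    let i := PySem.Int.mod r half
    (2 * i + PySem.Int.mod (y + block) 2, y))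

-- ===== PRECONDITION & SPEC =====
def Spec_raster_odd_iterator (width : Int) (height : Int) (out : List (Int × Int)) : Prop := out = raster_odd_iterator_alt width height
instance (width : Int) (height : Int) (out : List (Int × Int)) : Decidable (Spec_raster_odd_iterator width height out) := by unfold Spec_raster_odd_iterator; infer_instance

-- ===== CLAIM =====
def Claim_equal_raster_odd_iterator : Prop := ∀ (width : Int) (height : Int), Dom_raster_odd_iterator width height → Spec_raster_odd_iterator width height (raster_odd_iterator width height)

-- ===== LEMMAS AND PROOFS =====

-- pyRange 0 h 1 as a map over a Nat range (both nil when h ≤ 0)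
theorem pv_range_toNat (h : Int) :
    PySem.List.pyRange 0 h 1 = (List.range h.toNat).map (fun k : Nat => (k : Int)) := by
  by_cases hh : 0 ≤ h
  · have h1 : h = (h.toNat : Int) := by omega
    conv_lhs => rw [h1]
    exact PySem.List.pyRange_zero_natCast h.toNat
  · rw [PySem.List.pyRange_one_eq_nil (by omega)]
    have : h.toNat = 0 := by omega
    simp [this]

-- the trip count int(width/2) of A equals B's max(width // 2, 0) as a Nat
theorem pv_half_toNat (width : Int) :
    (width.tdiv 2).toNat = (max (PySem.Int.floordiv width 2) 0).toNat := by
  rw [PySem.Int.floordiv_eq_ediv_of_pos (by norm_num)]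
  have := @Int.tdiv_eq_ediv width 2
  rw [show (2:Int).sign = 1 from rfl] at this
  have h2 : width = 2 * (width / 2) + width % 2 := (Int.ediv_add_emod width 2).symm
  have h3 : 0 ≤ width % 2 ∧ width % 2 < 2 :=
    ⟨Int.emod_nonneg _ (by norm_num), Int.emod_lt_of_pos _ (by norm_num)⟩
  split_ifs at this <;> omega

-- the guard x < width never fires inside the half-range
theorem pv_guard (width p : Int) (hp : p = 0 ∨ p = 1) {i : Int}
    (hi : i ∈ PySem.List.pyRange 0 (width.tdiv 2) 1) : i * 2 + p < width := by
  rw [PySem.List.mem_pyRange_one] at hi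
  have := @Int.tdiv_eq_ediv width 2
  rw [show (2:Int).sign = 1 from rfl] at this
  have h2 : width = 2 * (width / 2) + width % 2 := (Int.ediv_add_emod width 2).symm
  have h3 : 0 ≤ width % 2 ∧ width % 2 < 2 :=
    ⟨Int.emod_nonneg _ (by norm_num), Int.emod_lt_of_pos _ (by norm_num)⟩
  rcases hp with rfl | rfl <;> split_ifs at this <;> omega

-- one row of A, with the guard discharged, as a map over the Nat half-range
theorem pv_row_eq (width y p : Int) (hp : p = 0 ∨ p = 1) (acc : List (Int × Int)) :
    (PySem.List.pyRange 0 (width.tdiv 2) 1).foldl (fun acc2 i_w =>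
        if i_w * 2 + p < width then acc2 ++ [(i_w * 2 + p, y)] else acc2) acc
      = acc ++ (List.range (max (PySem.Int.floordiv width 2) 0).toNat).map
          (fun i : Nat => ((i : Int) * 2 + p, y)) := by
  rw [PySem.List.foldl_append_ite (fun i => i * 2 + p < width) (fun i => (i * 2 + p, y))]
  have hfil : (PySem.List.pyRange 0 (width.tdiv 2) 1).filter
      (fun i => decide (i * 2 + p < width)) = PySem.List.pyRange 0 (width.tdiv 2) 1 := by
    apply List.filter_eq_self.mpr
    intro i hi
    exact decide_eq_true (pv_guard width p hp hi)
  rw [hfil, pv_range_toNat, ← pv_half_toNat, List.map_map]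
  rfl

-- index splitting: a map over range (n*m) with k ↦ (k / m, k % m) is the nested loop
theorem pv_flat_index {α : Type} (m n : Nat) (f : Nat → Nat → α) :
    (List.range (n * m)).map (fun k => f (k / m) (k % m))
      = (List.range n).flatMap (fun y => (List.range m).map (fun i => f y i)) := by
  induction n with
  | zero => simp
  | succ n ih =>
      rw [Nat.succ_mul, List.range_add, List.map_append, ih, List.range_succ,
        List.flatMap_append, List.map_map]
      congr 1
      simp only [List.flatMap_cons, List.flatMap_nil, List.append_nil]
      apply List.map_congr_left
      intro i hi
      rw [List.mem_range] at hi
      have hm : 0 < m := by omega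
      have hd : (n * m + i) / m = n := by
        rw [Nat.add_comm, Nat.add_mul_div_right _ _ hm, Nat.div_eq_of_lt hi]
        omega
      have hr : (n * m + i) % m = i := by
        rw [Nat.add_comm, Nat.add_mul_mod_self_right, Nat.mod_eq_of_lt hi]
      simp [Function.comp, hd, hr]

-- ===== VERDICT =====
theorem raster_odd_iterator_spec : Claim_equal_raster_odd_iterator := by
  intro width height _
  unfold Spec_raster_odd_iterator raster_odd_iterator raster_odd_iterator_alt
  simp only []
  set M : Nat := (max (PySem.Int.floordiv width 2) 0).toNat with hM
  set H : Nat := height.toNat with hH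
  set T : Nat := H * M with hT
  -- B's sizes as Nat casts
  have hhalf : max (PySem.Int.floordiv width 2) 0 = (M : Int) := by
    rw [hM]; omega
  have hrows : max height 0 = (H : Int) := by rw [hH]; omega
  have htot : max height 0 * max (PySem.Int.floordiv width 2) 0 = (T : Int) := by
    rw [hhalf, hrows, hT]; push_cast; ring
  -- the target shape both sides reach
  have key :
      (List.range T).map (fun k => ((2 * ((k % T % M : Nat) : Int)
          + (((k % T / M + k / T) % 2 : Nat) : Int), ((k % T / M : Nat) : Int)) : Int × Int))
        ++ (List.range T).map (fun k => ((2 * (((T + k) % T % M : Nat) : Int)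
          + ((((T + k) % T / M + (T + k) / T) % 2 : Nat) : Int), (((T + k) % T / M : Nat) : Int)) : Int × Int))
      = ((List.range H).flatMap (fun y : Nat => (List.range M).map
          (fun i : Nat => (((i : Int) * 2 + (y : Int) % 2, (y : Int)) : Int × Int))))
        ++ ((List.range H).flatMap (fun y : Nat => (List.range M).map
          (fun i : Nat => (((i : Int) * 2 + ((y : Int) + 1) % 2, (y : Int)) : Int × Int)))) := by
    congr 1
    · have h0 : ∀ k ∈ List.range T, k % T = k ∧ k / T = 0 := by
        intro k hk
        rw [List.mem_range] at hk
        exact ⟨Nat.mod_eq_of_lt hk, Nat.div_eq_of_lt hk⟩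
      rw [List.map_congr_left (fun k hk => by
        rw [(h0 k hk).1, (h0 k hk).2, Nat.add_zero])]
      rw [hT, pv_flat_index M H (fun y i => ((2 * (i : Int) + ((y % 2 : Nat) : Int), (y : Int)) : Int × Int))]
      apply List.flatMap_congr
      intro y _
      apply List.map_congr_left
      intro i _
      simp only [Prod.mk.injEq]
      refine ⟨?_, trivial⟩
      push_cast
      ring
    · have h1 : ∀ k ∈ List.range T, (T + k) % T = k ∧ (T + k) / T = 1 := by
        intro k hk
        rw [List.mem_range] at hk
        have hT0 : 0 < T := by omega
        constructor
        · rw [Nat.add_comm, Nat.add_mod_right, Nat.mod_eq_of_lt hk]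
        · rw [Nat.add_comm, Nat.add_div_right _ hT0, Nat.div_eq_of_lt hk]
      rw [List.map_congr_left (fun k hk => by
        rw [(h1 k hk).1, (h1 k hk).2])]
      rw [hT, pv_flat_index M H (fun y i => ((2 * (i : Int) + (((y + 1) % 2 : Nat) : Int), (y : Int)) : Int × Int))]
      apply List.flatMap_congr
      intro y _
      apply List.map_congr_left
      intro i _
      simp only [Prod.mk.injEq]
      refine ⟨?_, trivial⟩
      push_cast
      ring
  -- A's two blocks as flatMaps
  have hA : ∀ (p : Int → Int) (hp : ∀ y, p y = 0 ∨ p y = 1) (init : List (Int × Int)),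
      (PySem.List.pyRange 0 height 1).foldl (fun acc i_h =>
        (PySem.List.pyRange 0 (width.tdiv 2) 1).foldl (fun acc2 i_w =>
          if i_w * 2 + p i_h < width then acc2 ++ [(i_w * 2 + p i_h, i_h)] else acc2) acc) init
      = init ++ (List.range H).flatMap (fun y : Nat => (List.range M).map
          (fun i : Nat => ((i : Int) * 2 + p (y : Int), (y : Int)))) := by
    intro p hp init
    rw [pv_range_toNat height, List.foldl_map]
    rw [show (fun (acc : List (Int × Int)) (y : Nat) =>
          (PySem.List.pyRange 0 (width.tdiv 2) 1).foldl (fun acc2 i_w =>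
            if i_w * 2 + p (y : Int) < width then acc2 ++ [(i_w * 2 + p (y : Int), (y : Int))] else acc2) acc)
        = (fun (acc : List (Int × Int)) (y : Nat) => acc ++ (List.range M).map (fun i : Nat => ((i : Int) * 2 + p (y : Int), (y : Int)))) from
      funext fun acc => funext fun y => pv_row_eq width (y : Int) (p (y : Int)) (hp (y : Int)) acc]
    rw [PySem.List.foldl_append_eq_flatMap]
  rw [hA (fun y => y % 2) (fun y => by show y % 2 = 0 ∨ y % 2 = 1; omega) []]
  rw [hA (fun y => (y + 1) % 2) (fun y => by show (y + 1) % 2 = 0 ∨ (y + 1) % 2 = 1; omega)]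
  rw [List.nil_append]
  -- B's flat loop, pushed to Nat
  rw [htot, hhalf, show (2 : Int) * (T : Int) = ((2 * T : Nat) : Int) from by push_cast; ring,
    pv_range_toNat]
  rw [Int.toNat_natCast, List.map_map]
  rw [two_mul, List.range_add, List.map_append, List.map_map]
  rw [← key]
  congr 1
  · apply List.map_congr_left
    intro k _
    simp only [Function.comp]
    simp only [PySem.Int.floordiv_natCast, PySem.Int.mod_natCast]
    have : PySem.Int.mod (((k % T / M : Nat) : Int) + ((k / T : Nat) : Int)) 2
        = (((k % T / M + k / T) % 2 : Nat) : Int) := by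
      rw [show (((k % T / M : Nat) : Int) + ((k / T : Nat) : Int)) = (((k % T / M + k / T : Nat)) : Int) from by push_cast; ring,
        show (2 : Int) = ((2 : Nat) : Int) from rfl, PySem.Int.mod_natCast]
    rw [this]
  · apply List.map_congr_left
    intro k _
    simp only [Function.comp]
    simp only [PySem.Int.floordiv_natCast, PySem.Int.mod_natCast]
    have : PySem.Int.mod ((((T + k) % T / M : Nat) : Int) + (((T + k) / T : Nat) : Int)) 2
        = ((((T + k) % T / M + (T + k) / T) % 2 : Nat) : Int) := by
      rw [show ((((T + k) % T / M : Nat) : Int) + (((T + k) / T : Nat) : Int)) = ((((T + k) % T / M + (T + k) / T : Nat)) : Int) from by push_cast; ring,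
        show (2 : Int) = ((2 : Nat) : Int) from rfl, PySem.Int.mod_natCast]
    rw [this]
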